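-- pv_equiv track=rewrite | github.com/Semih1997/CodingBat-Java-Problems-in-Python | Codingbat Java String-3/QmirrorEnds.py | mirrorEnds
-- ===== SOURCE A (Python) =====
-- def mirrorEnds(a):
--     i = 0
--     new_a = ""
--     while i < len(a):
--         if a[i] == a[-i-1] and (a[i].isalpha() or a[i].isnumeric())== True:
--             new_a += a[i]
--             i += 1
--         else:
--             break
--     return new_a
-- ===== SOURCE B (Python) =====
-- def mirrorEnds(a):
--     # Two-phase: count the matching mirrored prefix, then return one slice.
--     n = len(a)
--     count = 0
--     for i in range(n):
--         if a[i] == a[-i-1] and (a[i].isalpha() or a[i].isnumeric()):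
--             count += 1
--         else:
--             break
--     return a[:count]
-- ===== Notes on version B (the rewrite author's own statement) =====
-- stated objective: faster
-- what changed: B keeps only an integer boundary (count of matching mirrored positions) and produces the result with a single slice, instead of A's while-loop growing a string by repeated concatenation.
import Mathlib
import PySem

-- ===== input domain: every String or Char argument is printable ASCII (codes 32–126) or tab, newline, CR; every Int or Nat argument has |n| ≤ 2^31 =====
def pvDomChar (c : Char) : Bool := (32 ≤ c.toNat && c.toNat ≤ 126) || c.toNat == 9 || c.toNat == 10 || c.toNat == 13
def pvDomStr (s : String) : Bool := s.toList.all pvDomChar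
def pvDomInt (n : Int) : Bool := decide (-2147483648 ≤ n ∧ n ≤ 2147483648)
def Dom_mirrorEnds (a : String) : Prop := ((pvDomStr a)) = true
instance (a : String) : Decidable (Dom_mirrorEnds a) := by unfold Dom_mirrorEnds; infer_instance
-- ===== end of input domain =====

-- B replaces A's string-growing while-loop by counting the matching mirrored
-- prefix and returning a single slice, avoiding quadratic string concatenation.

-- ===== PORT A =====
-- A's while-loop: index i, accumulator string new_a; fuel = len(a) bounds the
-- loop (i increases each iteration, so fuel = len(a) is always enough).
-- a[i].isnumeric() on the ASCII domain is exactly PySem.Chars.isdigit.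
def mirrorEndsGo (l : List Char) (i : Nat) (acc : List Char) : Nat → List Char
  | 0 => acc
  | fuel + 1 =>
    if i < l.length then
      match PySem.List.pyGet? l ((i : Nat) : Int), PySem.List.pyGet? l (-((i : Nat) : Int) - 1) with
      | some c, some d =>
        if c = d ∧ (PySem.Chars.isalpha c || PySem.Chars.isdigit c) = true then
          mirrorEndsGo l (i + 1) (acc ++ [c]) fuel
        else acc
      | _, _ => acc  -- unreachable: i < len, so both indexings succeed
    else acc

def mirrorEnds (a : String) : String :=
  String.mk (mirrorEndsGo a.toList 0 [] a.toList.length)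

-- ===== PORT B =====
-- B's counting loop: first i in [0, len) where the mirror condition fails
-- (break), i.e. the final count; then one slice a[:count] = take count
-- (exact for this nonnegative count).
def mirrorEndsCount (l : List Char) (i : Nat) : Nat :=
  if h : i < l.length then
    if l[i] = l[l.length - 1 - i]
        ∧ (PySem.Chars.isalpha l[i] || PySem.Chars.isdigit l[i]) = true then
      mirrorEndsCount l (i + 1)
    else i
  else i
termination_by l.length - i

def mirrorEnds_alt (a : String) : String :=
  String.mk (a.toList.take (mirrorEndsCount a.toList 0))

-- ===== PRECONDITION & SPEC =====
def Spec_mirrorEnds (a : String) (out : String) : Prop := out = mirrorEnds_alt a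
instance (a : String) (out : String) : Decidable (Spec_mirrorEnds a out) := by unfold Spec_mirrorEnds; infer_instance

-- ===== CLAIM (what is proved, stated in full; the proofs are below) =====
def Claim_equal_mirrorEnds : Prop := ∀ (a : String), Dom_mirrorEnds a → Spec_mirrorEnds a (mirrorEnds a)

-- ===== LEMMAS AND PROOFS =====

lemma mirrorEndsCount_ge (l : List Char) (i : Nat) : i ≤ mirrorEndsCount l i := by
  unfold mirrorEndsCount
  split
  · split
    · have := mirrorEndsCount_ge l (i + 1)
      omega
    · exact le_refl i
  · exact le_refl i
termination_by l.length - i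

lemma mirrorEndsGo_eq (l : List Char) (fuel i : Nat) (acc : List Char)
    (hf : l.length - i ≤ fuel) :
    mirrorEndsGo l i acc fuel = acc ++ (l.drop i).take (mirrorEndsCount l i - i) := by
  induction fuel generalizing i acc with
  | zero =>
    have hi : ¬ i < l.length := by omega
    simp [mirrorEndsGo, mirrorEndsCount, hi]
  | succ fuel ih =>
    by_cases hi : i < l.length
    · have h1 : PySem.List.pyGet? l ((i : Nat) : Int) = some l[i] := by
        simp [PySem.List.pyGet?_natCast, List.getElem?_eq_getElem hi]
      have h2 : PySem.List.pyGet? l (-((i : Nat) : Int) - 1) = some l[l.length - 1 - i] := by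
        have := PySem.List.pyGet?_neg_natCast l (i + 1) (by omega) (by omega)
        have harg : -(((i + 1 : Nat)) : Int) = -((i : Nat) : Int) - 1 := by push_cast; ring
        rw [harg] at this
        rw [this, List.getElem?_eq_getElem (by omega)]
        congr 2
        omega
      by_cases hc : l[i] = l[l.length - 1 - i]
          ∧ (PySem.Chars.isalpha l[i] || PySem.Chars.isdigit l[i]) = true
      · have hrec : mirrorEndsGo l i acc (fuel + 1)
            = mirrorEndsGo l (i + 1) (acc ++ [l[i]]) fuel := by
          simp only [mirrorEndsGo, if_pos hi, h1, h2]
          rw [if_pos hc]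
        have hcnt : mirrorEndsCount l i = mirrorEndsCount l (i + 1) := by
          rw [mirrorEndsCount]; rw [dif_pos hi, if_pos hc]
        rw [hrec, ih (i + 1) (acc ++ [l[i]]) (by omega), hcnt]
        have hge : i + 1 ≤ mirrorEndsCount l (i + 1) := mirrorEndsCount_ge l (i + 1)
        rw [List.drop_eq_getElem_cons hi]
        have hsucc : mirrorEndsCount l (i + 1) - i = (mirrorEndsCount l (i + 1) - (i + 1)) + 1 := by
          omega
        rw [hsucc, List.take_succ_cons, List.append_assoc]
        rfl
      · have hrec : mirrorEndsGo l i acc (fuel + 1) = acc := by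
          simp only [mirrorEndsGo, if_pos hi, h1, h2]
          rw [if_neg hc]
        have hcnt : mirrorEndsCount l i = i := by
          rw [mirrorEndsCount]; rw [dif_pos hi, if_neg hc]
        simp [hrec, hcnt]
    · have hcnt : mirrorEndsCount l i = i := by
        rw [mirrorEndsCount]; rw [dif_neg hi]
      simp [mirrorEndsGo, hi, hcnt]

-- ===== VERDICT (by name: the statement is the Claim_ definition above) =====
theorem mirrorEnds_spec : Claim_equal_mirrorEnds := by
  intro a _
  unfold Spec_mirrorEnds mirrorEnds mirrorEnds_alt
  rw [mirrorEndsGo_eq a.toList a.toList.length 0 [] (by omega)]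
  simp
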